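-- pv_equiv track=rewrite | github.com/danielhellgren/AdventOfCode2025 | Day6_TrashCompactor/SolutionPart2.py | splitByKey
-- ===== SOURCE A (Python) =====
-- def splitByKey(inStr, key):
--     splits = []
--     indexOffset = 0
--     for i, part in enumerate(key):
--         partSize = len(part)
--         split = inStr[indexOffset:indexOffset+partSize]
--         splits.append(split)
--         indexOffset += partSize + 1
--
--     return splits
-- ===== SOURCE B (Python) =====
-- def splitByKey(inStr, key):
--     # Phase 1: prefix-sum table of start offsets (part length + 1 separator each).
--     offsets = [0]
--     for part in key:
--         offsets.append(offsets[-1] + len(part) + 1)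
--     # Phase 2: slice by table lookup.
--     return [inStr[offsets[i]:offsets[i] + len(key[i])] for i in range(len(key))]
-- ===== Notes on version B (the rewrite author's own statement) =====
-- stated objective: alternative
-- what changed: Replaced A's single running-accumulator loop (slice while updating indexOffset) by a two-phase computation: first a prefix-sum pass building the full table of start offsets, then an index-driven comprehension that slices via table lookup.
import Mathlib
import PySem

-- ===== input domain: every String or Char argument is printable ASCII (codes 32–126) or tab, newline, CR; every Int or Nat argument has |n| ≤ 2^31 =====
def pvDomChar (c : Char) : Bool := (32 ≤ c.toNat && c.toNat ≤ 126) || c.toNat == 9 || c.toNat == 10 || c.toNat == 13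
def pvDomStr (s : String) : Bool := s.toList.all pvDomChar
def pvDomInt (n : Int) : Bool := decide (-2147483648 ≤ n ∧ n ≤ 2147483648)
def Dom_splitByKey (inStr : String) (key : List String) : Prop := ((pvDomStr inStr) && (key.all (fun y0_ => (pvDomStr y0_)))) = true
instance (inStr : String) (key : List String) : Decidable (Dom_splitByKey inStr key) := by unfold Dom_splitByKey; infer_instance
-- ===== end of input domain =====

-- B replaces A's running-accumulator loop by a prefix-sum offset table plus an
-- index-driven slicing pass (objective: alternative decomposition, same cost).

-- ===== PORT A =====
-- for i, part in enumerate(key): the index i is unused, so the loop is folded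
-- directly over key; state = (splits, indexOffset).
def splitByKey (inStr : String) (key : List String) : List String :=
  (key.foldl
    (fun (st : List String × Int) part =>
      let partSize := PySem.Str.len part
      let split := PySem.Str.slice inStr (some st.2) (some (st.2 + partSize))
      (st.1 ++ [split], st.2 + partSize + 1))
    ([], 0)).1

-- ===== PORT B =====
-- Phase 1: prefix-sum table of start offsets; offsets[-1] is the last element
-- (list always nonempty, so getLastD is exact: the default is never used).  Phase 2: slice by table lookup
-- (indices produced by range are in range, so getD is exact).
def splitByKey_alt (inStr : String) (key : List String) : List String :=
  let offsets : List Int :=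
    key.foldl (fun acc part => acc ++ [acc.getLastD 0 + PySem.Str.len part + 1]) [0]
  (List.range key.length).map (fun i =>
    PySem.Str.slice inStr (some (offsets.getD i 0))
      (some (offsets.getD i 0 + PySem.Str.len (key.getD i ""))))

-- ===== PRECONDITION & SPEC =====
def Spec_splitByKey (inStr : String) (key : List String) (out : List String) : Prop := out = splitByKey_alt inStr key
instance (inStr : String) (key : List String) (out : List String) : Decidable (Spec_splitByKey inStr key out) := by unfold Spec_splitByKey; infer_instance

-- ===== CLAIM (what is proved, stated in full; the proofs are below) =====
def Claim_equal_splitByKey : Prop := ∀ (inStr : String) (key : List String), Dom_splitByKey inStr key → Spec_splitByKey inStr key (splitByKey inStr key)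

-- ===== LEMMAS AND PROOFS =====

/-- The common reference value: slices of `inStr` starting at `o`, sized by the parts. -/
def pvSlices (inStr : String) (o : Int) : List String → List String
  | [] => []
  | p :: l =>
    PySem.Str.slice inStr (some o) (some (o + PySem.Str.len p)) ::
      pvSlices inStr (o + PySem.Str.len p + 1) l

/-- The tail of B's offset table, starting after an initial offset `o`. -/
def pvOffs : Int → List String → List Int
  | _, [] => []
  | o, p :: l => (o + PySem.Str.len p + 1) :: pvOffs (o + PySem.Str.len p + 1) l

theorem foldA_eq (inStr : String) (key : List String) :
    ∀ (acc : List String) (o : Int),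
      (key.foldl
        (fun (st : List String × Int) part =>
          let partSize := PySem.Str.len part
          let split := PySem.Str.slice inStr (some st.2) (some (st.2 + partSize))
          (st.1 ++ [split], st.2 + partSize + 1))
        (acc, o)).1 = acc ++ pvSlices inStr o key := by
  induction key with
  | nil => intro acc o; simp [pvSlices]
  | cons p l ih =>
    intro acc o
    simp only [List.foldl_cons, pvSlices, ih, List.append_assoc, List.singleton_append]

theorem foldB_eq (key : List String) :
    ∀ (acc : List Int) (o : Int), acc.getLastD 0 = o →
      key.foldl (fun acc part => acc ++ [acc.getLastD 0 + PySem.Str.len part + 1]) acc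
        = acc ++ pvOffs o key := by
  induction key with
  | nil => intro acc o _; simp [pvOffs]
  | cons p l ih =>
    intro acc o hlast
    simp only [List.foldl_cons, pvOffs]
    rw [ih (acc ++ [acc.getLastD 0 + PySem.Str.len p + 1]) (o + PySem.Str.len p + 1)
      (by rw [List.getLastD_concat, hlast]), hlast]
    simp

theorem mapB_eq (inStr : String) (key : List String) :
    ∀ (o : Int),
      (List.range key.length).map (fun i =>
        PySem.Str.slice inStr (some ((o :: pvOffs o key).getD i 0))
          (some ((o :: pvOffs o key).getD i 0 + PySem.Str.len (key.getD i ""))))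
        = pvSlices inStr o key := by
  induction key with
  | nil => intro o; simp [pvSlices]
  | cons p l ih =>
    intro o
    simp only [List.length_cons, List.range_succ_eq_map, List.map_cons, List.map_map,
      pvOffs, pvSlices]
    refine congrArg₂ _ (by simp) ?_
    rw [← ih (o + PySem.Str.len p + 1)]
    apply List.map_congr_left
    intro i _
    simp

-- ===== VERDICT (by name: the statement is the Claim_ definition above) =====
theorem splitByKey_spec : Claim_equal_splitByKey := by
  intro inStr key _
  unfold Spec_splitByKey splitByKey splitByKey_alt
  rw [foldA_eq inStr key [] 0,
    foldB_eq key [0] 0 (by simp),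
    List.singleton_append, mapB_eq inStr key 0]
  simp
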